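-- pv_equiv track=rewrite | github.com/pypi-data/pypi-mirror-342 | packages/dynamic-functioneer/dynamic_functioneer-1.1.1-py3-none-any.whl/dynamic_functioneer/prompt_code_cleaner.py | remove_extra_final_lines
-- ===== SOURCE A (Python) =====
-- def remove_extra_final_lines(input_code):
--     """
--     Removes extra final lines from the code that have zero indentation.
--
--     Args:
--         input_code (str): The input Python code as a string.
--
--     Returns:
--         str: The cleaned Python code with unnecessary final lines removed.
--     """
--     lines = input_code.splitlines()
--
--     while lines:
--         last_line = lines[-1]  # Check the last line
--         if last_line.strip() == "" or not last_line.startswith(" "):  # Line has zero indentation or is blank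
--             lines.pop()  # Remove the last line
--         else:
--             break  # Stop if the last line has non-zero indentation
--
--     return "\n".join(lines)
-- ===== SOURCE B (Python) =====
-- def remove_extra_final_lines(input_code):
--     lines = input_code.splitlines()
--     last_keep = None
--     for i, line in enumerate(lines):
--         if line.startswith(" ") and line.strip():
--             last_keep = i
--     if last_keep is None:
--         return ""
--     return "\n".join(lines[:last_keep + 1])
-- ===== Notes on version B (the rewrite author's own statement) =====
-- stated objective: alternative
-- what changed: Replaces A's backward while-pop loop over the line list with a single forward scan that records the last index of a kept line (space-indented, non-blank) and then slices the list once.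
import Mathlib
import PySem

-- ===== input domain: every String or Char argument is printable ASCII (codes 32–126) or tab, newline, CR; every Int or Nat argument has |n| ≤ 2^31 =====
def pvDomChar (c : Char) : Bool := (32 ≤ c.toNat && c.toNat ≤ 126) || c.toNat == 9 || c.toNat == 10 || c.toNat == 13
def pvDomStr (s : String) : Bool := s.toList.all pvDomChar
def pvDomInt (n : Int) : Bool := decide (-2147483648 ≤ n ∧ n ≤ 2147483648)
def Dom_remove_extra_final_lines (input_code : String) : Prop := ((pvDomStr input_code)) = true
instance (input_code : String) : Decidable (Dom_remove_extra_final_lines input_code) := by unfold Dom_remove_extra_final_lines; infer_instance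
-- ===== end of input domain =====

-- B differs from A only in decomposition (forward index-finding scan + one slice, instead of
-- A's backward while-pop loop); same return value everywhere.

-- ===== PORT A =====
-- A's while-loop: look at the last line; pop it if blank or not space-indented, else stop.
def pvPopLoop (lines : List String) : List String :=
  match _h : lines.getLast? with
  | none => lines
  | some last_line =>
      if PySem.Str.strip last_line == "" || !PySem.Str.startswith last_line " " then
        pvPopLoop lines.dropLast
      else
        lines
termination_by lines.length
decreasing_by
  cases lines with
  | nil => simp at _h
  | cons a as => simp [List.length_dropLast]

def remove_extra_final_lines (input_code : String) : String :=
  PySem.Str.join "\n" (pvPopLoop (PySem.Str.splitlines input_code))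

-- ===== PORT B =====
-- forward scan: remember the index of the last space-indented non-blank line
def pvLastKeep (lines : List String) : Option Int :=
  (PySem.List.enumerate lines 0).foldl
    (fun last_keep p =>
      if PySem.Str.startswith p.2 " " && !(PySem.Str.strip p.2 == "") then some p.1 else last_keep)
    none

def remove_extra_final_lines_alt (input_code : String) : String :=
  let lines := PySem.Str.splitlines input_code
  match pvLastKeep lines with
  | none => ""
  | some i => PySem.Str.join "\n" (PySem.List.slice lines none (some (i + 1)))

-- ===== PRECONDITION & SPEC =====
def Spec_remove_extra_final_lines (input_code : String) (out : String) : Prop := out = remove_extra_final_lines_alt input_code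
instance (input_code : String) (out : String) : Decidable (Spec_remove_extra_final_lines input_code out) := by unfold Spec_remove_extra_final_lines; infer_instance

-- ===== CLAIM (what is proved, stated in full; the proofs are below) =====
def Claim_equal_remove_extra_final_lines : Prop := ∀ (input_code : String), Dom_remove_extra_final_lines input_code → Spec_remove_extra_final_lines input_code (remove_extra_final_lines input_code)

-- ===== LEMMAS AND PROOFS =====

theorem pvPopLoop_concat (ls : List String) (a : String) :
    pvPopLoop (ls ++ [a]) =
      if PySem.Str.strip a == "" || !PySem.Str.startswith a " " then pvPopLoop ls
      else ls ++ [a] := by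
  rw [pvPopLoop]
  split
  · next h => simp at h
  · next last h =>
      rw [List.getLast?_concat] at h
      injection h with h
      subst h
      rw [List.dropLast_concat]

theorem pvLastKeep_concat (ls : List String) (a : String) :
    pvLastKeep (ls ++ [a]) =
      if PySem.Str.startswith a " " && !(PySem.Str.strip a == "") then some (ls.length : Int)
      else pvLastKeep ls := by
  unfold pvLastKeep
  rw [PySem.List.enumerate_append, List.foldl_append]
  simp [PySem.List.enumerate_cons, PySem.List.enumerate_nil]

theorem pvLastKeep_bound (ls : List String) :
    ∀ i, pvLastKeep ls = some i → 0 ≤ i ∧ i < ls.length := by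
  induction ls using List.reverseRecOn with
  | nil => intro i h; simp [pvLastKeep, PySem.List.enumerate_nil] at h
  | append_singleton ls a ih =>
      intro i h
      rw [pvLastKeep_concat] at h
      split at h
      · simp at h; subst h; simp
      · have := ih i h; simp only [List.length_append, List.length_cons, List.length_nil]; push_cast; omega

theorem pvPopLoop_eq_take (ls : List String) :
    pvPopLoop ls =
      (match pvLastKeep ls with
       | none => ([] : List String)
       | some i => ls.take (i + 1).toNat) := by
  induction ls using List.reverseRecOn with
  | nil => simp [pvLastKeep, PySem.List.enumerate_nil, pvPopLoop]
  | append_singleton ls a ih =>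
      rw [pvPopLoop_concat, pvLastKeep_concat]
      by_cases hsw : PySem.Str.startswith a " " = true
      · by_cases hst : (PySem.Str.strip a == "") = true
        · -- blank line: popped by A, not kept by B
          simp only [hsw, hst, Bool.not_true, Bool.true_or, if_true]
          rw [ih]
          cases h : pvLastKeep ls with
          | none => rfl
          | some i =>
              have hb := pvLastKeep_bound ls i h
              simp [List.take_append_of_le_length (by omega : (i + 1).toNat ≤ ls.length)]
        · -- kept line: A stops, B records index ls.length
          simp only [hsw, hst, Bool.not_false, Bool.true_and]
          simp
      · -- not space-indented: popped by A, not kept by B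
        simp only [Bool.not_eq_true] at hsw
        simp only [hsw, Bool.not_false, Bool.or_true, Bool.false_and, if_true]
        rw [ih]
        cases h : pvLastKeep ls with
        | none => rfl
        | some i =>
            have hb := pvLastKeep_bound ls i h
            simp [List.take_append_of_le_length (by omega : (i + 1).toNat ≤ ls.length)]

-- ===== VERDICT (by name: the statement is the Claim_ definition above) =====
theorem remove_extra_final_lines_spec : Claim_equal_remove_extra_final_lines := by
  intro input_code _
  unfold Spec_remove_extra_final_lines remove_extra_final_lines remove_extra_final_lines_alt
  rw [pvPopLoop_eq_take]
  cases h : pvLastKeep (PySem.Str.splitlines input_code) with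
  | none => simp only [h]; simp [PySem.Str.join, PySem.Chars.join, List.intercalate]
  | some i =>
      have hb := pvLastKeep_bound _ i h
      simp only [h]
      rw [PySem.List.slice_to _ (b := i + 1) (by omega)]
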